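-- pv_equiv track=rewrite | github.com/solurin/pythonstuff | MainWindow.py | exposeLine
-- ===== SOURCE A (Python) =====
-- def exposeLine(line):
-- 	newline = ""
-- 	i = 0
-- 	for ch in line:
-- 		if ch != " " and ch != "\t":
-- 			break
-- 		if ch == " ":
-- 			newline += "."
-- 		elif ch == "\t":
-- 			newline += "----->"
-- 		i += 1
-- 	newline += line[i:]
-- 	return newline
-- ===== SOURCE B (Python) =====
-- def exposeLine(line):
--     rest = line.lstrip(" \t")
--     prefix = line[:len(line) - len(rest)]
--     return "----->".join("." * len(seg) for seg in prefix.split("\t")) + rest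
-- ===== Notes on version B (the rewrite author's own statement) =====
-- stated objective: simpler
-- what changed: Replaces A's per-character scan-with-break that appends to an accumulator and counts an index by a run-length algorithm: split the leading-whitespace prefix on tabs, turn each all-space segment into a dot run of its length, and join the runs with the arrow string.
import Mathlib
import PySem

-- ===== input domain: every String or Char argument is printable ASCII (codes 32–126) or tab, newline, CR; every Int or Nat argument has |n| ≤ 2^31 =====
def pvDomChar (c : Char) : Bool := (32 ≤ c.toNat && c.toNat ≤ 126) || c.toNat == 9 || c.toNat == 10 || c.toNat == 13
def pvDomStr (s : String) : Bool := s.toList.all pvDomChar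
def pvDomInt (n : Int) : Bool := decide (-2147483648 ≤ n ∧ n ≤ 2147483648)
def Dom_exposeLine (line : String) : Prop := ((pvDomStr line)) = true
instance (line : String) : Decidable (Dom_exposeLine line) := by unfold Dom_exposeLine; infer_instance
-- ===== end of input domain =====

-- B replaces A's char-by-char scan (break + accumulator + index counter) by a run-length
-- algorithm: split the leading-whitespace prefix on tabs and join the dot-runs with the
-- arrow string, never touching individual whitespace characters (objective: simpler).

-- ===== PORT A =====
-- the for-loop with break: state = (newline, i); strings carried as List Char (PySem convention)
def exposeLoopA : List Char → List Char → Nat → List Char × Nat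
  | [], nl, i => (nl, i)
  | ch :: rest, nl, i =>
    if ch ≠ ' ' ∧ ch ≠ '\t' then (nl, i)          -- break
    else if ch = ' ' then exposeLoopA rest (nl ++ ['.']) (i + 1)
    else exposeLoopA rest (nl ++ ['-','-','-','-','-','>']) (i + 1)

def exposeLine (line : String) : String :=
  let r := exposeLoopA line.toList [] 0
  -- newline += line[i:]; i is a nonnegative in-range index, so the slice is List.drop (exact)
  String.mk (r.1 ++ line.toList.drop r.2)

-- ===== PORT B =====
-- line.lstrip(" \t") = dropWhile over {' ','\t'} (exact hand port of lstrip with chars);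
-- prefix.split("\t") = List.splitOn '\t' (Python str.split with a 1-char separator, exact);
-- "." * len(seg) = List.replicate; "----->".join = List.intercalate
def exposeLine_alt (line : String) : String :=
  let l := line.toList
  let rest := l.dropWhile (fun c => c == ' ' || c == '\t')
  let pre := l.take (l.length - rest.length)
  let segs := pre.splitOn '\t'
  String.mk (List.intercalate ['-','-','-','-','-','>']
      (segs.map (fun seg => List.replicate seg.length '.')) ++ rest)

-- ===== PRECONDITION & SPEC =====
def Spec_exposeLine (line : String) (out : String) : Prop := out = exposeLine_alt line
instance (line : String) (out : String) : Decidable (Spec_exposeLine line out) := by unfold Spec_exposeLine; infer_instance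

-- ===== CLAIM (what is proved, stated in full; the proofs are below) =====
def Claim_equal_exposeLine : Prop := ∀ (line : String), Dom_exposeLine line → Spec_exposeLine line (exposeLine line)

-- ===== LEMMAS AND PROOFS =====

lemma exposeLoopA_eq (cs : List Char) : ∀ nl i,
    exposeLoopA cs nl i =
      (nl ++ (cs.takeWhile (fun c => c == ' ' || c == '\t')).flatMap
          (fun c => if c = ' ' then ['.'] else ['-','-','-','-','-','>']),
       i + (cs.takeWhile (fun c => c == ' ' || c == '\t')).length) := by
  induction cs with
  | nil => intro nl i; simp [exposeLoopA]
  | cons c cs ih =>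
    intro nl i
    by_cases hs : c = ' '
    · subst hs
      simp [exposeLoopA, ih]
      omega
    · by_cases ht : c = '\t'
      · subst ht
        simp [exposeLoopA, ih]
        omega
      · simp [exposeLoopA, hs, ht]

lemma intercalate_cons_cons {α : Type} (sep x : List α) (a : α) (xs : List (List α)) :
    List.intercalate sep ((a :: x) :: xs) = a :: List.intercalate sep (x :: xs) := by
  cases xs <;> simp [List.intercalate]

lemma intercalate_nil_cons {α : Type} (sep y : List α) (ys : List (List α)) :
    List.intercalate sep ([] :: y :: ys) = sep ++ List.intercalate sep (y :: ys) := by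
  simp [List.intercalate]

-- the run-length split/join over the whitespace prefix equals A's per-char mapping
lemma split_join_eq (cs : List Char) (h : ∀ c ∈ cs, c = ' ' ∨ c = '\t') :
    List.intercalate ['-','-','-','-','-','>']
      ((cs.splitOn '\t').map (fun seg => List.replicate seg.length '.')) =
    cs.flatMap (fun c => if c = ' ' then ['.'] else ['-','-','-','-','-','>']) := by
  induction cs with
  | nil => simp [List.splitOn, List.splitOnP_nil, List.intercalate]
  | cons c cs ih =>
    have hcs : ∀ c ∈ cs, c = ' ' ∨ c = '\t' := fun x hx => h x (List.mem_cons_of_mem _ hx)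
    rcases h c (List.mem_cons_self) with hc | hc
    · subst hc
      have hne : cs.splitOn '\t' ≠ [] := List.splitOnP_ne_nil _ _
      obtain ⟨s, ss, hss⟩ := List.exists_cons_of_ne_nil hne
      simp only [List.splitOn, List.splitOnP_cons] at *
      rw [if_neg (by decide)]
      rw [hss] at ih ⊢
      simp only [List.modifyHead, List.map_cons, List.replicate_succ, List.length_cons]
      rw [intercalate_cons_cons]
      simpa using ih hcs
    · subst hc
      have hne : cs.splitOn '\t' ≠ [] := List.splitOnP_ne_nil _ _
      obtain ⟨s, ss, hss⟩ := List.exists_cons_of_ne_nil hne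
      simp only [List.splitOn, List.splitOnP_cons] at *
      rw [if_pos (by decide)]
      rw [hss] at ih ⊢
      simp only [List.replicate, List.length_nil, List.map]
      rw [intercalate_nil_cons]
      simpa using ih hcs

-- ===== VERDICT (by name: the statement is the Claim_ definition above) =====
theorem exposeLine_spec : Claim_equal_exposeLine := by
  intro line _
  unfold Spec_exposeLine exposeLine exposeLine_alt
  obtain ⟨tw, dw, hl, ht, hd⟩ :
      ∃ tw dw, line.toList = tw ++ dw ∧
        line.toList.takeWhile (fun c => c == ' ' || c == '\t') = tw ∧
        line.toList.dropWhile (fun c => c == ' ' || c == '\t') = dw :=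
    ⟨_, _, (List.takeWhile_append_dropWhile).symm, rfl, rfl⟩
  rw [exposeLoopA_eq]
  simp only [Nat.zero_add, List.nil_append]
  rw [ht, hd, hl]
  have hn : (tw ++ dw).length - dw.length = tw.length := by simp
  rw [hn, List.take_left, List.drop_left]
  have hmem : ∀ c ∈ tw, c = ' ' ∨ c = '\t' := by
    intro c hc
    have := List.mem_takeWhile_imp (ht ▸ hc)
    simp only [Bool.or_eq_true, beq_iff_eq] at this
    exact this
  rw [split_join_eq tw hmem]
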